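-- pv_equiv track=rewrite | github.com/BeautifulTrouble/beautifulrising-backends | utils.py | nest_parens
-- ===== SOURCE A (Python) =====
-- def nest_parens(text, level=0):
--     '''
--     Typographically adjust parens such that parens within parens become
--     alternating brackets and parens. Use a level argument to move all nested
--     parens "down a level" (e.g.: "(hello [world])" --> "[hello (world)]")
--     '''
--     adjusted = []
--     for c in text:
--         if c in '([':
--             c = '(['[level%2]
--             level += 1
--         elif c in '])':
--             c = '])'[level%2]
--             level -= 1
--         adjusted.append(c)
--     return ''.join(adjusted)
-- ===== SOURCE B (Python) =====
-- def _delta(c):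
--     if c in '([':
--         return 1
--     if c in '])':
--         return -1
--     return 0
--
-- def _levels_before(text, level):
--     lb = []
--     for c in text:
--         lb.append(level)
--         level += _delta(c)
--     return lb
--
-- def _render(c, lb):
--     if c in '([':
--         return '(['[lb % 2]
--     if c in '])':
--         return '])'[lb % 2]
--     return c
--
-- def nest_parens(text, level=0):
--     lb = _levels_before(text, level)
--     return ''.join(_render(c, l) for c, l in zip(text, lb))
-- ===== Notes on version B (the rewrite author's own statement) =====
-- stated objective: alternative
-- what changed: Replaces A's single incremental-state loop (mutating level while appending) with a build-table-then-map decomposition: first compute the level-before-each-character prefix table, then render each character from its table entry and join.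
import Mathlib
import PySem

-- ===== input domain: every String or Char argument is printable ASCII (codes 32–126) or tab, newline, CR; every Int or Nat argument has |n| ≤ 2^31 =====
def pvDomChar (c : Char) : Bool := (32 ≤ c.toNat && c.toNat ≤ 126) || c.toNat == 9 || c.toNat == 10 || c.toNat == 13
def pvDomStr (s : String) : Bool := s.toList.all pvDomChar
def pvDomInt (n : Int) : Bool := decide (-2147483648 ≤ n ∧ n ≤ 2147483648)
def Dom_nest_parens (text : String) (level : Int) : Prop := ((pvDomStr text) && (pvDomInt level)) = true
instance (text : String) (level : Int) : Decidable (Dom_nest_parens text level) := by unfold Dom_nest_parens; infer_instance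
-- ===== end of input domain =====

-- B replaces A's incremental-state loop by a level-table-then-map decomposition (alternative, same cost).

-- ===== PORT A =====
-- one step of A's loop: state = (adjusted so far, current level)
def pvStepA (st : List Char × Int) (c : Char) : List Char × Int :=
  if c == '(' || c == '[' then
    (st.1 ++ [if PySem.Int.mod st.2 2 == 0 then '(' else '['], st.2 + 1)
  else if c == ']' || c == ')' then
    (st.1 ++ [if PySem.Int.mod st.2 2 == 0 then ']' else ')'], st.2 - 1)
  else
    (st.1 ++ [c], st.2)

def nest_parens (text : String) (level : Int) : String :=
  String.mk (text.toList.foldl pvStepA ([], level)).1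

-- ===== PORT B =====
def pvDelta (c : Char) : Int :=
  if c == '(' || c == '[' then 1
  else if c == ']' || c == ')' then -1
  else 0

-- the level BEFORE each character (prefix table)
def pvLevelsBefore : List Char → Int → List Int
  | [], _ => []
  | c :: rest, l => l :: pvLevelsBefore rest (l + pvDelta c)

def pvRender (c : Char) (lb : Int) : Char :=
  if c == '(' || c == '[' then (if PySem.Int.mod lb 2 == 0 then '(' else '[')
  else if c == ']' || c == ')' then (if PySem.Int.mod lb 2 == 0 then ']' else ')')
  else c

def nest_parens_alt (text : String) (level : Int) : String :=
  String.mk (List.zipWith pvRender text.toList (pvLevelsBefore text.toList level))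

-- ===== PRECONDITION & SPEC =====
def Spec_nest_parens (text : String) (level : Int) (out : String) : Prop := out = nest_parens_alt text level
instance (text : String) (level : Int) (out : String) : Decidable (Spec_nest_parens text level out) := by unfold Spec_nest_parens; infer_instance

-- ===== CLAIM (what is proved, stated in full; the proofs are below) =====
def Claim_equal_nest_parens : Prop := ∀ (text : String) (level : Int), Dom_nest_parens text level → Spec_nest_parens text level (nest_parens text level)

-- ===== LEMMAS AND PROOFS =====
lemma pvStepA_eq (acc : List Char) (l : Int) (c : Char) :
    pvStepA (acc, l) c = (acc ++ [pvRender c l], l + pvDelta c) := by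
  by_cases h1 : c == '(' || c == '['
  · simp [pvStepA, pvRender, pvDelta, h1]
  · by_cases h2 : c == ']' || c == ')'
    · simp [pvStepA, pvRender, pvDelta, h1, h2]; ring
    · simp [pvStepA, pvRender, pvDelta, h1, h2]

lemma foldA_eq (cs : List Char) (l : Int) (acc : List Char) :
    (cs.foldl pvStepA (acc, l)).1 = acc ++ List.zipWith pvRender cs (pvLevelsBefore cs l) := by
  induction cs generalizing l acc with
  | nil => simp [pvLevelsBefore]
  | cons c cs ih =>
      simp only [List.foldl_cons, pvStepA_eq, pvLevelsBefore, List.zipWith]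
      rw [ih]
      simp

-- ===== VERDICT (by name: the statement is the Claim_ definition above) =====
theorem nest_parens_spec : Claim_equal_nest_parens := by
  intro text level _
  show _ = _
  unfold nest_parens nest_parens_alt
  rw [foldA_eq]
  simp
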